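-- pv_equiv track=rewrite | github.com/teresaga/Data-structures-and-algorithms | Hashtable/first_reocurre_item.py | reocurre
-- ===== SOURCE A (Python) =====
-- def reocurre(arr): # Brute Force
--   min = float("inf")
--   min_item = None
--   count = 0
--
--   for i in range(len(arr)):
--     count = 0
--
--     for j in range(i+1,len(arr)):
--       if arr[i] != arr[j]:
--         count += 1
--
--       if arr[i] == arr[j] and count < min:
--         min = count
--         min_item = arr[i]
--
--   return min_item
-- ===== SOURCE B (Python) =====
-- def reocurre(arr):
--     # One O(n) pass from the right with a hashmap of the nearest later index of each
--     # value yields, per index i, the gap to the next equal element; then a single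
--     # forward scan keeps the first strict minimum (A is the O(n^2) brute force).
--     nxt = {}
--     gaps = []  # gap for index i, collected back-to-front
--     for i in range(len(arr) - 1, -1, -1):
--         v = arr[i]
--         gaps.append(nxt[v] - i - 1 if v in nxt else None)
--         nxt[v] = i
--     best_gap = None
--     best_item = None
--     for v, g in zip(arr, reversed(gaps)):
--         if g is not None and (best_gap is None or g < best_gap):
--             best_gap, best_item = g, v
--     return best_item
-- ===== Notes on version B (the rewrite author's own statement) =====
-- stated objective: faster
-- what changed: Replaced the O(n^2) nested scan counting unequal elements between every equal pair by one right-to-left pass with a hashmap of the nearest later index of each value (giving each index its gap to the next equal element) followed by a single forward minimum scan.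
import Mathlib
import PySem

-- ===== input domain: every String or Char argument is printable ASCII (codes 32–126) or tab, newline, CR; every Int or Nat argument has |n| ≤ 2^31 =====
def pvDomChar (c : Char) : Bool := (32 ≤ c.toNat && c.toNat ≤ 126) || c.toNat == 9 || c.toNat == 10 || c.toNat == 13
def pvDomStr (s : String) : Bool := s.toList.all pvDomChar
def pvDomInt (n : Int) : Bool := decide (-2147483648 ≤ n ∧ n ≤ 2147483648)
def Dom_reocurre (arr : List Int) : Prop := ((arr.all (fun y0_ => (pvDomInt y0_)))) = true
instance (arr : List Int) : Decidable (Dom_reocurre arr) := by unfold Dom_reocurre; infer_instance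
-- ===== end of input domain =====

-- B replaces A's O(n^2) nested scan by one right-to-left hashmap pass plus a forward minimum scan (measured asymptotically faster).

-- ===== PORT A =====
-- 'count < min' with min starting at float('inf'): none plays inf (no float arithmetic ever happens in A)
def ltInf (c : Int) (m : Option Int) : Bool :=
  match m with
  | none => true
  | some mv => decide (c < mv)

def reocurre (arr : List Int) : Option Int :=
  let n : Int := arr.length
  -- indices produced by range(...) are always in range, hence pyGetD's default is never used
  let res := (PySem.List.pyRange 0 n 1).foldl
    (fun (st : Option Int × Option Int) i =>
      ((PySem.List.pyRange (i + 1) n 1).foldl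
        (fun (t : (Option Int × Option Int) × Int) j =>
          let ai := PySem.List.pyGetD arr i 0
          let aj := PySem.List.pyGetD arr j 0
          let c1 := if ai ≠ aj then t.2 + 1 else t.2
          (if ai = aj ∧ ltInf c1 t.1.1 then (some c1, some ai) else t.1, c1))
        (st, 0)).1)
    (none, none)
  res.2

-- ===== PORT B =====
def reocurre_alt (arr : List Int) : Option Int :=
  let st := (PySem.List.pyRange ((arr.length : Int) - 1) (-1) (-1)).foldl
    (fun (st : PySem.Dict Int Int × List (Option Int)) i =>
      let v := PySem.List.pyGetD arr i 0
      let g : Option Int :=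
        match st.1.get? v with
        | some j => some (j - i - 1)
        | none => none
      (st.1.insert v i, st.2 ++ [g]))
    (PySem.Dict.empty, [])
  let res := (arr.zip st.2.reverse).foldl
    (fun (b : Option Int × Option Int) p =>
      match p.2 with
      | none => b
      | some g => if ltInf g b.1 then (some g, some p.1) else b)
    (none, none)
  res.2

-- ===== PRECONDITION & SPEC =====
def Spec_reocurre (arr : List Int) (out : Option Int) : Prop := out = reocurre_alt arr
instance (arr : List Int) (out : Option Int) : Decidable (Spec_reocurre arr out) := by unfold Spec_reocurre; infer_instance

-- ===== CLAIM (what is proved, stated in full; the proofs are below) =====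
def Claim_equal_reocurre : Prop := ∀ (arr : List Int), Dom_reocurre arr → Spec_reocurre arr (reocurre arr)

-- ===== LEMMAS AND PROOFS =====

-- helper definitions and lemmas (used only by the proofs)
def innerF (x : Int) (t : (Option Int × Option Int) × Int) (y : Int) : (Option Int × Option Int) × Int :=
  let c1 := if x ≠ y then t.2 + 1 else t.2
  (if x = y ∧ ltInf c1 t.1.1 then (some c1, some x) else t.1, c1)

lemma innerF_eq_of_eq (x : Int) (t : (Option Int × Option Int) × Int) :
    innerF x t x = (if ltInf t.2 t.1.1 then (some t.2, some x) else t.1, t.2) := by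
  simp [innerF]

lemma innerF_eq_of_ne (x y : Int) (t : (Option Int × Option Int) × Int) (h : x ≠ y) :
    innerF x t y = (t.1, t.2 + 1) := by
  simp [innerF, h]

lemma foldl_innerF_frozen (l : List Int) (x : Int) (it : Option Int) :
    ∀ (c mv : Int), mv ≤ c → (l.foldl (innerF x) ((some mv, it), c)).1 = (some mv, it) := by
  induction l with
  | nil => intro c mv h; rfl
  | cons y l ih =>
    intro c mv h
    rw [List.foldl_cons]
    by_cases hxy : x = y
    · subst hxy
      rw [innerF_eq_of_eq]
      have : ltInf c (some mv) = false := by simp [ltInf]; omega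
      simp only [this, Bool.false_eq_true, ite_false]
      exact ih c mv h
    · rw [innerF_eq_of_ne x y _ hxy]
      exact ih (c + 1) mv (by omega)

lemma foldl_innerF_spec (l : List Int) (x : Int) :
    ∀ (m it : Option Int) (c : Int),
    (l.foldl (innerF x) ((m, it), c)).1 =
      match l.findIdx? (· == x) with
      | none => (m, it)
      | some k => if ltInf (c + (k : Int)) m then (some (c + (k : Int)), some x) else (m, it) := by
  induction l with
  | nil => intro m it c; rfl
  | cons y l ih =>
    intro m it c
    rw [List.foldl_cons, List.findIdx?_cons]
    by_cases hxy : x = y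
    · subst hxy
      have hb : (x == x) = true := by simp
      rw [innerF_eq_of_eq]
      simp only [hb, if_pos]
      cases hm : ltInf c m with
      | false =>
        simp only [Bool.false_eq_true, ite_false]
        match m, hm with
        | some mv, hm =>
          have hle : mv ≤ c := by simp [ltInf] at hm; omega
          have : ltInf (c + ((0 : Nat) : Int)) (some mv) = false := by simpa using hm
          simp only [this, Bool.false_eq_true, ite_false]
          exact foldl_innerF_frozen l x it c mv hle
      | true =>
        simp only [Nat.cast_zero, add_zero, hm, ite_true]
        exact foldl_innerF_frozen l x (some x) c c le_rfl
    · have hb : (y == x) = false := by simp; exact fun h => hxy h.symm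
      rw [innerF_eq_of_ne x y _ hxy]
      simp only [hb, Bool.false_eq_true, ite_false]
      rw [ih m it (c + 1)]
      cases l.findIdx? (· == x) with
      | none => rfl
      | some k =>
        have h2 : (c + 1) + (k : Int) = c + ((k + 1 : Nat) : Int) := by push_cast; ring
        simp only [Option.map_some, h2]

def gapOf (x : Int) (xs : List Int) : Option Int :=
  (xs.findIdx? (· == x)).map (fun k => (k : Int))

def specGaps : List Int → List (Option Int)
  | [] => []
  | x :: xs => gapOf x xs :: specGaps xs

def passF (arr : List Int) (st : PySem.Dict Int Int × List (Option Int)) (i : Int) :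
    PySem.Dict Int Int × List (Option Int) :=
  let v := PySem.List.pyGetD arr i 0
  let g : Option Int :=
    match st.1.get? v with
    | some j => some (j - i - 1)
    | none => none
  (st.1.insert v i, st.2 ++ [g])

lemma passB_inv (arr : List Int) :
    ∀ (k : Nat), k ≤ arr.length →
    (∀ v : Int,
      (((PySem.List.pyRange ((arr.length - k : Nat) : Int) (arr.length : Int) 1).reverse).foldl
          (passF arr) (PySem.Dict.empty, [])).1.get? v
        = ((arr.drop (arr.length - k)).findIdx? (· == v)).map
            (fun j => (((arr.length - k) + j : Nat) : Int))) ∧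
    (((PySem.List.pyRange ((arr.length - k : Nat) : Int) (arr.length : Int) 1).reverse).foldl
        (passF arr) (PySem.Dict.empty, [])).2
      = (specGaps (arr.drop (arr.length - k))).reverse := by
  intro k
  induction k with
  | zero =>
    intro _
    rw [Nat.sub_zero, PySem.List.pyRange_one_eq_nil (le_refl _), List.drop_length]
    simp [specGaps, PySem.Dict.get?_empty]
  | succ k ih =>
    intro hk
    have ihk := ih (by omega)
    set n := arr.length with hn
    have hilt : n - (k+1) < n := by omega
    have hcast : ((n - (k+1) : Nat) : Int) + 1 = ((n - k : Nat) : Int) := by omega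
    rw [PySem.List.pyRange_one_cons (by exact_mod_cast hilt), hcast, List.reverse_cons,
      List.foldl_append, List.foldl_cons, List.foldl_nil]
    set i := n - (k + 1) with hidef
    have hik : n - k = i + 1 := by omega
    rw [hik] at ihk
    simp only [hik]
    obtain ⟨ihd, ihg⟩ := ihk
    set sold := ((PySem.List.pyRange ((i + 1 : Nat) : Int) (n : Int) 1).reverse).foldl
        (passF arr) (PySem.Dict.empty, ([] : List (Option Int))) with hsold
    have hvi : PySem.List.pyGetD arr ((i : Nat) : Int) 0 = arr[i] := by
      rw [PySem.List.pyGetD_natCast, List.getD_eq_getElem _ _ hilt]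
    have hdrop : arr.drop i = arr[i] :: arr.drop (i + 1) := List.drop_eq_getElem_cons hilt
    constructor
    · intro w
      show (PySem.Dict.insert _ _ _).get? w = _
      rw [PySem.Dict.get?_insert, hvi, hdrop, List.findIdx?_cons]
      by_cases hwv : w = arr[i]
      · have : (arr[i] == w) = true := by simp [hwv]
        simp [hwv]
      · have : (arr[i] == w) = false := by simp; exact fun h => hwv h.symm
        simp only [this, Bool.false_eq_true, ite_false, if_neg hwv]
        rw [ihd w]
        cases (arr.drop (i+1)).findIdx? (· == w) with
        | none => rfl
        | some j => simp only [Option.map_some]; congr 1; omega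
    · show sold.2 ++ _ = _
      rw [hdrop]
      show sold.2 ++ [_] = (specGaps (arr[i] :: arr.drop (i+1))).reverse
      rw [ihg]
      have hg : (match sold.1.get? (PySem.List.pyGetD arr ((i : Nat) : Int) 0) with
          | some j => some (j - ((i : Nat) : Int) - 1)
          | none => (none : Option Int)) = gapOf arr[i] (arr.drop (i + 1)) := by
        rw [hvi, ihd arr[i], gapOf]
        cases (arr.drop (i+1)).findIdx? (· == arr[i]) with
        | none => rfl
        | some j => simp only [Option.map_some]; congr 1; push_cast; omega
      rw [hg, specGaps, List.reverse_cons]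

def stepS (b : Option Int × Option Int) (p : Int × Option Int) : Option Int × Option Int :=
  match p.2 with
  | none => b
  | some g => if ltInf g b.1 then (some g, some p.1) else b

lemma outerA (arr : List Int) :
    ∀ st : Option Int × Option Int,
    (PySem.List.pyRange 0 (arr.length : Int) 1).foldl
      (fun st i => stepS st (PySem.List.pyGetD arr i 0,
        gapOf (PySem.List.pyGetD arr i 0) (arr.drop (i + 1).toNat))) st
    = (arr.zip (specGaps arr)).foldl stepS st := by
  induction arr with
  | nil => intro st; rfl
  | cons x xs ih =>
    intro st
    have hlen : ((x :: xs).length : Int) = (xs.length : Int) + 1 := by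
      push_cast [List.length_cons]; ring
    rw [hlen, PySem.List.pyRange_one_cons (by omega), List.foldl_cons]
    have h0 : stepS st (PySem.List.pyGetD (x :: xs) 0 0,
        gapOf (PySem.List.pyGetD (x :: xs) 0 0) ((x :: xs).drop ((0 : Int) + 1).toNat))
        = stepS st (x, gapOf x xs) := by
      rw [PySem.List.pyGetD_zero_cons]
      rfl
    rw [h0]
    have hshift : PySem.List.pyRange (0 + 1) ((xs.length : Int) + 1) 1
        = (PySem.List.pyRange 0 (xs.length : Int) 1).map (· + 1) := by
      rw [PySem.List.pyRange_one, PySem.List.pyRange_one, List.map_map]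
      have h1 : ((xs.length : Int) + 1 - (0 + 1)).toNat = xs.length := by omega
      have h2 : ((xs.length : Int) - 0).toNat = xs.length := by omega
      rw [h1, h2]
      apply List.map_congr_left
      intro k _
      simp; ring
    rw [hshift, List.foldl_map]
    rw [PySem.List.foldl_congr_mem _ _
      (fun st k => stepS st (PySem.List.pyGetD xs k 0,
        gapOf (PySem.List.pyGetD xs k 0) (xs.drop (k + 1).toNat))) _ ?_]
    · rw [ih (stepS st (x, gapOf x xs))]
      rfl
    · intro acc k hk
      have hk0 : 0 ≤ k := (PySem.List.mem_pyRange_one.mp hk).1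
      lift k to Nat using hk0
      have e1 : PySem.List.pyGetD (x :: xs) ((k : Int) + 1) 0 = PySem.List.pyGetD xs (k : Int) 0 := by
        have : ((k : Int) + 1) = ((k + 1 : Nat) : Int) := by push_cast; ring
        rw [this, PySem.List.pyGetD_natCast, PySem.List.pyGetD_natCast, List.getD_cons_succ]
      have e2 : (((k : Int) + 1) + 1).toNat = ((k : Int) + 1).toNat + 1 := by omega
      rw [e1, e2]
      congr 2

lemma reocurre_eq (arr : List Int) :
    reocurre arr = ((arr.zip (specGaps arr)).foldl stepS (none, none)).2 := by
  simp only [reocurre]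
  congr 1
  rw [PySem.List.foldl_congr_mem _ _
    (fun st i => stepS st (PySem.List.pyGetD arr i 0,
      gapOf (PySem.List.pyGetD arr i 0) (arr.drop (i + 1).toNat))) _ ?_]
  · exact outerA arr (none, none)
  · intro st i hi
    have hi0 : 0 ≤ i := (PySem.List.mem_pyRange_one.mp hi).1
    have hinner := PySem.List.foldl_pyRange_pyGetD' arr 0
      (innerF (PySem.List.pyGetD arr i 0)) (st, 0) (a := i + 1) (by omega)
    rw [show (fun (t : (Option Int × Option Int) × Int) (j : Int) =>
        (if PySem.List.pyGetD arr i 0 = PySem.List.pyGetD arr j 0 ∧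
            ltInf (if PySem.List.pyGetD arr i 0 ≠ PySem.List.pyGetD arr j 0 then t.2 + 1 else t.2) t.1.1 = true
          then (some (if PySem.List.pyGetD arr i 0 ≠ PySem.List.pyGetD arr j 0 then t.2 + 1 else t.2),
                some (PySem.List.pyGetD arr i 0))
          else t.1,
         if PySem.List.pyGetD arr i 0 ≠ PySem.List.pyGetD arr j 0 then t.2 + 1 else t.2))
        = (fun t j => innerF (PySem.List.pyGetD arr i 0) t (PySem.List.pyGetD arr j 0)) from rfl,
      hinner, foldl_innerF_spec]
    simp only [zero_add, stepS, gapOf]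
    cases (arr.drop (i + 1).toNat).findIdx? (· == PySem.List.pyGetD arr i 0) with
    | none => rfl
    | some k => simp

lemma reocurre_alt_eq (arr : List Int) :
    reocurre_alt arr = ((arr.zip (specGaps arr)).foldl stepS (none, none)).2 := by
  simp only [reocurre_alt]
  have h1 : PySem.List.pyRange ((arr.length : Int) - 1) (-1) (-1)
      = (PySem.List.pyRange 0 (arr.length : Int) 1).reverse := by
    rw [PySem.List.pyRange_neg_one_eq_reverse]
    norm_num
  rw [h1]
  have hinv := (passB_inv arr arr.length le_rfl).2
  rw [Nat.sub_self] at hinv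
  simp only [Nat.cast_zero, List.drop_zero] at hinv
  rw [show (fun (st : PySem.Dict Int Int × List (Option Int)) (i : Int) =>
      (st.1.insert (PySem.List.pyGetD arr i 0) i,
       st.2 ++ [(match st.1.get? (PySem.List.pyGetD arr i 0) with
                 | some j => some (j - i - 1)
                 | none => (none : Option Int))]))
      = passF arr from rfl, hinv, List.reverse_reverse]
  rfl


-- ===== VERDICT (by name: the statement is the Claim_ definition above) =====
theorem reocurre_spec : Claim_equal_reocurre := by
  intro arr _
  unfold Spec_reocurre
  rw [reocurre_eq, reocurre_alt_eq]
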